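-- pv_equiv track=rewrite | github.com/ips610/TIET-Webkiosk-Result-Fetcher | dbtest.py | convert_to_list_of_dictionaries
-- ===== SOURCE A (Python) =====
-- def convert_to_list_of_dictionaries(text_content):
--     marks_list = []
--     lines = text_content.strip().split("\n")
--
--     exam_data = {}
--     for line in lines:
--         line = line.strip()
--         if line:  # Check if the line is not empty
--             key_value = line.split(": ")
--             if len(key_value) == 2:  # Ensure that line has both key and value
--                 key, value = key_value
--                 exam_data[key] = value
--             else:
--                 # Assuming each exam record is separated by an empty line
--                 if exam_data:
--                     marks_list.append(exam_data.copy())  # Create a shallow copy of the dictionary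
--                     exam_data = {}  # Create a new dictionary for the next exam record
--
--     # Append the last exam_data to the marks_list
--     if exam_data:
--         marks_list.append(exam_data.copy())  # Create a shallow copy of the dictionary
--
--     return marks_list
-- ===== SOURCE B (Python) =====
-- def convert_to_list_of_dictionaries(text_content):
--     # classify-then-group: split into maximal runs of key-value lines, one dict per run
--     lines = [ln.strip() for ln in text_content.strip().split("\n")]
--     lines = [ln for ln in lines if ln]
--     result = []
--     i, n = 0, len(lines)
--     while i < n:
--         is_kv = len(lines[i].split(": ")) == 2
--         j = i
--         while j < n and (len(lines[j].split(": ")) == 2) == is_kv: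
--             j += 1
--         if is_kv:
--             result.append(dict(ln.split(": ") for ln in lines[i:j]))
--         i = j
--     return result
-- ===== Notes on version B (the rewrite author's own statement) =====
-- stated objective: idiomatic
-- what changed: Replaces the flush-on-separator state machine (mutable dict accumulator flushed when a non key-value line or end of input is met) by a classify-then-group pipeline: filter the nonempty stripped lines, split them into maximal runs of same classification (key-value vs not), and build one dict per key-value run.
import Mathlib
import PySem

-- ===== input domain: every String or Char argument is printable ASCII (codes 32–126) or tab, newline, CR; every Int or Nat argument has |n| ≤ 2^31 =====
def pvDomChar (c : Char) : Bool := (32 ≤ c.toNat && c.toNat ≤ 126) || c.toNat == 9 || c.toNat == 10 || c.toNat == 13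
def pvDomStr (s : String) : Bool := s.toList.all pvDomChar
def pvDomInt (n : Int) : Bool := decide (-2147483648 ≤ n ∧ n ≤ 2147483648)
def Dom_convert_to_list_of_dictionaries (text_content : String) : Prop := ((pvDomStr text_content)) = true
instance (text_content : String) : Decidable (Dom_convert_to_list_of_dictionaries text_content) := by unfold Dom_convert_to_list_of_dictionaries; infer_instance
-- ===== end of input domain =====

-- B replaces A's flush-on-separator state machine by a classify-then-group pipeline
-- (filter nonempty lines, split into maximal runs of key-value-ness, one dict per
-- key-value run); same return value, objective: more idiomatic decomposition.


-- ===== PORT A =====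
-- str.split with a nonempty literal separator (exact; Chars.splitOn is Python's s.split(sep))
def pvSplit (s sep : String) : List String := (PySem.Chars.splitOn s.toList sep.toList).map String.ofList

-- one iteration of A's loop: strip the line; skip empty lines; on a "k: v" line
-- insert into the current dict; otherwise flush the dict (if nonempty) to the list
def pvStepA (st : List (List (String × String)) × PySem.Dict String String) (rawline : String) :
    List (List (String × String)) × PySem.Dict String String :=
  let line := PySem.Str.strip rawline
  if line ≠ "" then
    match pvSplit line ": " with
    | [key, value] => (st.1, st.2.insert key value)   -- len(key_value) == 2
    | _ => if st.2.items ≠ [] then (st.1 ++ [st.2.items], PySem.Dict.empty) else st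
  else st

def convert_to_list_of_dictionaries (text_content : String) : List (List (String × String)) :=
  let lines := pvSplit (PySem.Str.strip text_content) "\n"
  let st := lines.foldl pvStepA ([], PySem.Dict.empty)
  if st.2.items ≠ [] then st.1 ++ [st.2.items] else st.1

-- ===== PORT B =====
def pvIsKV (l : String) : Bool := (pvSplit l ": ").length == 2

-- dict(ln.split(': ') for ln in run) — every line of a run fed to it splits in two
def pvDictOf (run : List String) : PySem.Dict String String :=
  run.foldl
    (fun (d : PySem.Dict String String) (l : String) => match pvSplit l ": " with
      | [k, v] => d.insert k v
      | _ => d) PySem.Dict.empty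

-- the two-pointer while loops of B: peel off the maximal run with the same
-- key-value classification as the head; emit a dict for key-value runs
def pvRuns : List String → List (List (String × String))
  | [] => []
  | x :: xs =>
    if pvIsKV x then
      (pvDictOf (x :: xs.takeWhile (fun y => pvIsKV y == pvIsKV x))).items
        :: pvRuns (xs.dropWhile (fun y => pvIsKV y == pvIsKV x))
    else
      pvRuns (xs.dropWhile (fun y => pvIsKV y == pvIsKV x))
termination_by l => l.length
decreasing_by
  all_goals exact Nat.lt_succ_of_le (List.length_dropWhile_le _ _)

def convert_to_list_of_dictionaries_alt (text_content : String) : List (List (String × String)) :=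
  let lines := (pvSplit (PySem.Str.strip text_content) "\n").map PySem.Str.strip
  pvRuns (lines.filter (fun l => l ≠ ""))

-- ===== PRECONDITION & SPEC =====
def Spec_convert_to_list_of_dictionaries (text_content : String) (out : List (List (String × String))) : Prop := out = convert_to_list_of_dictionaries_alt text_content
instance (text_content : String) (out : List (List (String × String))) : Decidable (Spec_convert_to_list_of_dictionaries text_content out) := by unfold Spec_convert_to_list_of_dictionaries; infer_instance

-- ===== CLAIM (what is proved, stated in full; the proofs are below) =====
def Claim_equal_convert_to_list_of_dictionaries : Prop := ∀ (text_content : String), Dom_convert_to_list_of_dictionaries text_content → Spec_convert_to_list_of_dictionaries text_content (convert_to_list_of_dictionaries text_content)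

-- ===== LEMMAS AND PROOFS =====

-- A's "rest of the computation" on already-stripped lines, given the current dict
def pvRestA (ed : PySem.Dict String String) : List String → List (List (String × String))
  | [] => if ed.items ≠ [] then [ed.items] else []
  | l :: ls =>
    if l ≠ "" then
      match pvSplit l ": " with
      | [k, v] => pvRestA (ed.insert k v) ls
      | _ => (if ed.items ≠ [] then [ed.items] else []) ++ pvRestA PySem.Dict.empty ls
    else pvRestA ed ls

theorem pvKV_ne_empty {l : String} (h : pvIsKV l = true) : l ≠ "" := by
  rintro rfl
  exact absurd h (by decide)

theorem pvKV_split {l : String} (h : pvIsKV l = true) : ∃ k v, pvSplit l ": " = [k, v] := by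
  have : (pvSplit l ": ").length = 2 := by
    simpa [pvIsKV] using h
  exact List.length_eq_two.mp this

theorem pvRestA_cons_kv (ed : PySem.Dict String String) (y : String) (ls : List String)
    (k v : String) (hsp : pvSplit y ": " = [k, v]) (hne : y ≠ "") :
    pvRestA ed (y :: ls) = pvRestA (ed.insert k v) ls := by
  simp only [pvRestA]
  rw [if_pos hne, hsp]

theorem pvRestA_cons_sep (ed : PySem.Dict String String) (y : String) (ls : List String)
    (hy : pvIsKV y = false) (hne : y ≠ "") :
    pvRestA ed (y :: ls) = (if ed.items ≠ [] then [ed.items] else []) ++ pvRestA PySem.Dict.empty ls := by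
  simp only [pvRestA]
  rw [if_pos hne]
  split
  · next k v heq => exact absurd (by simp [pvIsKV, heq] : pvIsKV y = true) (by simp [hy])
  · rfl

theorem pvStepA_empty (ml : List (List (String × String))) (ed : PySem.Dict String String)
    (l : String) (h : PySem.Str.strip l = "") : pvStepA (ml, ed) l = (ml, ed) := by
  simp only [pvStepA]
  rw [if_neg (by simp [h])]

theorem pvStepA_kv (ml : List (List (String × String))) (ed : PySem.Dict String String)
    (l k v : String) (h : PySem.Str.strip l ≠ "") (hsp : pvSplit (PySem.Str.strip l) ": " = [k, v]) :
    pvStepA (ml, ed) l = (ml, ed.insert k v) := by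
  simp only [pvStepA]
  rw [if_pos h, hsp]

theorem pvStepA_sep (ml : List (List (String × String))) (ed : PySem.Dict String String)
    (l : String) (h : PySem.Str.strip l ≠ "") (hkv : pvIsKV (PySem.Str.strip l) = false) :
    pvStepA (ml, ed) l = if ed.items ≠ [] then (ml ++ [ed.items], PySem.Dict.empty) else (ml, ed) := by
  simp only [pvStepA]
  rw [if_pos h]
  split
  · next k v heq =>
      exact absurd (by simp [pvIsKV, heq] : pvIsKV (PySem.Str.strip l) = true) (by simp [hkv])
  · rfl

theorem pvA_eq_restA (ls : List String) : ∀ ml ed,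
    (let st := ls.foldl pvStepA (ml, ed);
     if st.2.items ≠ [] then st.1 ++ [st.2.items] else st.1) = ml ++ pvRestA ed (ls.map PySem.Str.strip) := by
  induction ls with
  | nil =>
    intro ml ed
    simp only [List.foldl_nil, List.map_nil, pvRestA]
    split_ifs <;> simp
  | cons l ls ih =>
    intro ml ed
    simp only [List.foldl_cons, List.map_cons]
    by_cases h : PySem.Str.strip l = ""
    · rw [pvStepA_empty ml ed l h, ih ml ed]
      simp [pvRestA, h]
    · by_cases hkv : pvIsKV (PySem.Str.strip l) = true
      · obtain ⟨k, v, hsp⟩ := pvKV_split hkv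
        rw [pvStepA_kv ml ed l k v h hsp, ih ml (ed.insert k v),
            pvRestA_cons_kv ed _ _ k v hsp h]
      · have hkv' : pvIsKV (PySem.Str.strip l) = false := by simpa using hkv
        rw [pvRestA_cons_sep ed _ _ hkv' h, pvStepA_sep ml ed l h hkv']
        by_cases hne : ed.items = []
        · have hed : ed = PySem.Dict.empty := by
            apply PySem.Dict.ext; simpa using hne
          rw [if_neg (show ¬ (ed.items ≠ []) from by simpa using hne), ih ml ed, hed]
          simp
          rfl
        · rw [if_pos (show ed.items ≠ [] from hne), ih (ml ++ [ed.items]) PySem.Dict.empty]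
          simp [hne]

theorem pvRestA_filter (ls : List String) : ∀ ed,
    pvRestA ed ls = pvRestA ed (ls.filter (fun l => l ≠ "")) := by
  induction ls with
  | nil => intro ed; rfl
  | cons l ls ih =>
    intro ed
    by_cases h : l = ""
    · subst h
      simp only [List.filter_cons, decide_eq_true_eq]
      simp [pvRestA, ih]
    · rw [List.filter_cons, if_pos (by simpa using h : decide (l ≠ "") = true)]
      by_cases hkv : pvIsKV l = true
      · obtain ⟨k, v, hsp⟩ := pvKV_split hkv
        rw [pvRestA_cons_kv ed l _ k v hsp h, pvRestA_cons_kv ed l _ k v hsp h, ih]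
      · have hkv' : pvIsKV l = false := by simpa using hkv
        rw [pvRestA_cons_sep ed l _ hkv' h, pvRestA_cons_sep ed l _ hkv' h, ih]

theorem pvRestA_kv_run (run : List String) : ∀ (d : List String) (ed : PySem.Dict String String),
    (∀ l ∈ run, pvIsKV l = true) →
    pvRestA ed (run ++ d) = pvRestA (run.foldl
      (fun (d : PySem.Dict String String) (l : String) => match pvSplit l ": " with
        | [k, v] => d.insert k v
        | _ => d) ed) d := by
  induction run with
  | nil => intro d ed _; rfl
  | cons l run ih =>
    intro d ed hall
    have hkv : pvIsKV l = true := hall l List.mem_cons_self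
    obtain ⟨k, v, hsp⟩ := pvKV_split hkv
    rw [List.cons_append, pvRestA_cons_kv ed l _ k v hsp (pvKV_ne_empty hkv),
        ih d (ed.insert k v) (fun x hx => hall x (List.mem_cons_of_mem _ hx)),
        List.foldl_cons]
    simp [hsp]

theorem pvRestA_sep_run (run : List String) : ∀ d, (∀ l ∈ run, pvIsKV l = false) →
    pvRestA PySem.Dict.empty (run ++ d) = pvRestA PySem.Dict.empty d := by
  induction run with
  | nil => intro d _; rfl
  | cons l run ih =>
    intro d hall
    have hl : pvIsKV l = false := hall l List.mem_cons_self
    by_cases h : l = ""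
    · subst h
      rw [List.cons_append]
      show pvRestA PySem.Dict.empty (run ++ d) = _
      exact ih d (fun x hx => hall x (List.mem_cons_of_mem _ hx))
    · rw [List.cons_append, pvRestA_cons_sep _ l _ hl h,
          ih d (fun x hx => hall x (List.mem_cons_of_mem _ hx))]
      have he : (PySem.Dict.empty : PySem.Dict String String).items = [] := rfl
      rw [if_neg (show ¬ ((PySem.Dict.empty : PySem.Dict String String).items ≠ []) from by simp [he])]
      simp

theorem pvInsert_items_ne (d : PySem.Dict String String) (k v : String) :
    (d.insert k v).items ≠ [] := by
  rw [PySem.Dict.items_insert]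
  split_ifs with hc
  · intro hmap
    have : d.items = [] := by simpa using hmap
    have hk : k ∈ d.keys := (PySem.Dict.contains_iff_mem_keys _ _).mp hc
    rw [PySem.Dict.keys, this] at hk
    simp at hk
  · simp

theorem pvFoldl_items_ne (run : List String) : ∀ ed, run ≠ [] → (∀ l ∈ run, pvIsKV l = true) →
    (run.foldl
      (fun (d : PySem.Dict String String) (l : String) => match pvSplit l ": " with
        | [k, v] => d.insert k v
        | _ => d) ed).items ≠ [] := by
  induction run with
  | nil => intro ed hne _; exact absurd rfl hne
  | cons l run ih =>
    intro ed _ hall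
    obtain ⟨k, v, hsp⟩ := pvKV_split (hall l List.mem_cons_self)
    rcases run with _ | ⟨r, rs⟩
    · simp only [List.foldl_cons, List.foldl_nil, hsp]
      exact pvInsert_items_ne ed k v
    · rw [List.foldl_cons]
      exact ih _ (by simp) (fun x hx => hall x (List.mem_cons_of_mem _ hx))

theorem pvRestA_flush (d : List String) (ed : PySem.Dict String String)
    (hne : ed.items ≠ [])
    (hd : d = [] ∨ ∃ y d', d = y :: d' ∧ pvIsKV y = false ∧ y ≠ "") :
    pvRestA ed d = ed.items :: pvRestA PySem.Dict.empty d := by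
  rcases hd with rfl | ⟨y, d', rfl, hy, hjne⟩
  · show (if ed.items ≠ [] then [ed.items] else []) = ed.items :: (if (PySem.Dict.empty : PySem.Dict String String).items ≠ [] then _ else _)
    simp [hne, PySem.Dict.empty]
  · rw [pvRestA_cons_sep ed y d' hy hjne, pvRestA_cons_sep PySem.Dict.empty y d' hy hjne]
    simp [hne, PySem.Dict.empty]

theorem pvRestA_eq_runs : ∀ (ls : List String), (∀ x ∈ ls, x ≠ "") →
    pvRestA PySem.Dict.empty ls = pvRuns ls := by
  intro ls
  induction ls using pvRuns.induct with
  | case1 =>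
    intro _
    simp only [pvRuns, pvRestA]
    rw [if_neg (show ¬ ((PySem.Dict.empty : PySem.Dict String String).items ≠ []) from by
      simp [show (PySem.Dict.empty : PySem.Dict String String).items = [] from rfl])]
  | case2 x xs hx ih =>
    intro h
    have hxs : x :: xs =
        (x :: xs.takeWhile (fun y => pvIsKV y == pvIsKV x)) ++ xs.dropWhile (fun y => pvIsKV y == pvIsKV x) := by
      rw [List.cons_append, List.takeWhile_append_dropWhile]
    have hallrun : ∀ l ∈ x :: xs.takeWhile (fun y => pvIsKV y == pvIsKV x), pvIsKV l = true := by
      intro l hl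
      rcases List.mem_cons.mp hl with rfl | hl
      · exact hx
      · have := List.mem_takeWhile_imp hl
        simpa [hx] using this
    have hd_mem : ∀ y ∈ xs.dropWhile (fun y => pvIsKV y == pvIsKV x), y ≠ "" :=
      fun y hy => h y (List.mem_cons_of_mem _ ((List.dropWhile_sublist _).mem hy))
    have hdshape : xs.dropWhile (fun y => pvIsKV y == pvIsKV x) = [] ∨
        ∃ y d', xs.dropWhile (fun y => pvIsKV y == pvIsKV x) = y :: d' ∧ pvIsKV y = false ∧ y ≠ "" := by
      rcases hdw : xs.dropWhile (fun y => pvIsKV y == pvIsKV x) with _ | ⟨y, d'⟩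
      · exact Or.inl rfl
      · refine Or.inr ⟨y, d', rfl, ?_, hd_mem y (by rw [hdw]; exact List.mem_cons_self)⟩
        have hpy := List.head?_dropWhile_not (fun y => pvIsKV y == pvIsKV x) xs
        rw [hdw] at hpy
        simp only [List.head?_cons] at hpy
        simpa [hx] using hpy
    conv_lhs => rw [hxs]
    rw [pvRestA_kv_run _ _ _ hallrun,
        pvRestA_flush _ _ (pvFoldl_items_ne _ _ (by simp) hallrun) hdshape,
        ih hd_mem]
    simp only [pvRuns]
    rw [if_pos hx]
    rfl
  | case3 x xs hx ih =>
    intro h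
    have hx' : pvIsKV x = false := by simpa using hx
    have hxs : x :: xs =
        (x :: xs.takeWhile (fun y => pvIsKV y == pvIsKV x)) ++ xs.dropWhile (fun y => pvIsKV y == pvIsKV x) := by
      rw [List.cons_append, List.takeWhile_append_dropWhile]
    have hallrun : ∀ l ∈ x :: xs.takeWhile (fun y => pvIsKV y == pvIsKV x), pvIsKV l = false := by
      intro l hl
      rcases List.mem_cons.mp hl with rfl | hl
      · exact hx'
      · have := List.mem_takeWhile_imp hl
        simpa [hx'] using this
    have hd_mem : ∀ y ∈ xs.dropWhile (fun y => pvIsKV y == pvIsKV x), y ≠ "" :=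
      fun y hy => h y (List.mem_cons_of_mem _ ((List.dropWhile_sublist _).mem hy))
    conv_lhs => rw [hxs]
    rw [pvRestA_sep_run _ _ hallrun, ih hd_mem]
    simp only [pvRuns]
    rw [if_neg hx]

-- ===== VERDICT (by name: the statement is the Claim_ definition above) =====
theorem convert_to_list_of_dictionaries_spec : Claim_equal_convert_to_list_of_dictionaries := by
  intro t _
  unfold Spec_convert_to_list_of_dictionaries convert_to_list_of_dictionaries convert_to_list_of_dictionaries_alt
  simp only
  rw [pvA_eq_restA, List.nil_append, pvRestA_filter, pvRestA_eq_runs]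
  intro x hx
  simpa using (List.mem_filter.mp hx).2
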